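-- pv_equiv track=rewrite | github.com/HarryMayne/rule_articulation_faithfulness | src/rules/rules.py | rule_14
-- ===== SOURCE A (Python) =====
-- def rule_14(s: str) -> bool:
--     """
--     Rule 14: The string contains balanced double quotes (an even count of the " character),
--     and at least one quoted segment (the text between a matched pair of double quotes)
--     contains a space character. Quotes are paired from left to right, and only the straight
--     ASCII double quote character (") is considered.
--
--     Examples:
--     >>> rule_14('We waited as the announcement said "final call for boarding" just before noon.')
--     True
--     >>> rule_14('She whispered, "good night, everyone," and closed the door.')
--     True
--     >>> rule_14('The label read "Fragile." on the box.')
--     False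
--     >>> rule_14('The chalkboard says "Back soon.')
--     False
--     >>> rule_14('Lights dimmed as the curtains closed.')
--     False
--     """
--     quote_indices = [i for i, ch in enumerate(s) if ch == '"']
--     if len(quote_indices) < 2 or len(quote_indices) % 2 != 0:
--         return False
--
--     for i in range(0, len(quote_indices), 2):
--         start = quote_indices[i]
--         end = quote_indices[i + 1]
--         segment = s[start + 1 : end]
--         if " " in segment:
--             return True
--     return False
-- ===== SOURCE B (Python) =====
-- def rule_14(s: str) -> bool:
--     # Single pass over the characters: track quote parity and whether the
--     # currently open quoted segment has seen a space; a closing quote whose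
--     # segment saw a space sets found. Balanced-quote guard via total count.
--     quote_count = 0
--     in_quote = False
--     seen_space = False
--     found = False
--     for ch in s:
--         if ch == '"':
--             quote_count += 1
--             if in_quote:
--                 if seen_space:
--                     found = True
--             else:
--                 seen_space = False
--             in_quote = not in_quote
--         elif ch == ' ' and in_quote:
--             seen_space = True
--     return found and quote_count % 2 == 0
-- ===== Notes on version B (the rewrite author's own statement) =====
-- stated objective: faster
-- what changed: Replaced the build-index-list-then-slice-pairs approach (collect all quote indices, then for each pair slice the string and substring-search for a space) by a single-pass O(1)-extra-space state machine over the characters that tracks quote count, in-quote flag, and a per-open-segment seen-space flag.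
import Mathlib
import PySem

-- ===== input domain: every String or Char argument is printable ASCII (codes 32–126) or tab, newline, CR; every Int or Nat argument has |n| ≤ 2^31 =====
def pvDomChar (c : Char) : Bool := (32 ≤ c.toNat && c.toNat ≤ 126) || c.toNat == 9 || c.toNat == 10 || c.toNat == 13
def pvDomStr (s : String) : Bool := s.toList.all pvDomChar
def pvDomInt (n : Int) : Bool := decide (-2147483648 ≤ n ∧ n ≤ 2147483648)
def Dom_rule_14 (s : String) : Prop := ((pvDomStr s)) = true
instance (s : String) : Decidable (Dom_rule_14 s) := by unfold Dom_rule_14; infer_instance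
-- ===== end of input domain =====

-- B replaces A's quote-index list and per-pair slicing by a single-pass state machine (same result, O(1) extra space).

-- ===== PORT A =====
def rule_14 (s : String) : Bool :=
  -- quote_indices = [i for i, ch in enumerate(s) if ch == '"']
  let quote_indices := ((PySem.List.enumerate s.toList).filter (fun p => p.2 == '"')).map (fun p => p.1)
  if quote_indices.length < 2 ∨ quote_indices.length % 2 ≠ 0 then false
  else
    -- for i in range(0, len(quote_indices), 2): early 'return True' = any
    (PySem.List.pyRange 0 quote_indices.length 2).any fun i =>
      -- indices are always in range here, so pyGetD's default is never used
      let start := PySem.List.pyGetD quote_indices i 0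
      let end_ := PySem.List.pyGetD quote_indices (i + 1) 0
      let segment := PySem.Chars.slice s.toList (some (start + 1)) (some end_)
      PySem.Chars.isIn [' '] segment

-- ===== PORT B =====
-- the body of Source B's for-loop, acting on the state (quote_count, in_quote, seen_space, found)
def rule14Step (st : Int × Bool × Bool × Bool) (ch : Char) : Int × Bool × Bool × Bool :=
  if ch == '"' then
    (st.1 + 1, !st.2.1, if st.2.1 then st.2.2.1 else false,
     if st.2.1 && st.2.2.1 then true else st.2.2.2)
  else if ch == ' ' && st.2.1 then (st.1, st.2.1, true, st.2.2.2)
  else st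

def rule_14_alt (s : String) : Bool :=
  let st := s.toList.foldl rule14Step (0, false, false, false)
  st.2.2.2 && (PySem.Int.mod st.1 2 == 0)

-- ===== PRECONDITION & SPEC =====
def Spec_rule_14 (s : String) (out : Bool) : Prop := out = rule_14_alt s
instance (s : String) (out : Bool) : Decidable (Spec_rule_14 s out) := by unfold Spec_rule_14; infer_instance

-- ===== CLAIM (what is proved, stated in full; the proofs are below) =====
def Claim_equal_rule_14 : Prop := ∀ (s : String), Dom_rule_14 s → Spec_rule_14 s (rule_14 s)

-- ===== LEMMAS AND PROOFS =====

-- list-level views of the two ports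
def qIdx (l : List Char) (st : Int) : List Int :=
  ((PySem.List.enumerate l st).filter (fun p => p.2 == '"')).map (fun p => p.1)

def pairsAny : List Int → List Char → Bool
  | i :: j :: rest, l =>
      PySem.Chars.isIn [' '] (PySem.Chars.slice l (some (i + 1)) (some j)) || pairsAny rest l
  | _, _ => false

def Af (l : List Char) : Bool :=
  let qs := qIdx l 0
  if qs.length < 2 ∨ qs.length % 2 ≠ 0 then false
  else
    (PySem.List.pyRange 0 qs.length 2).any fun i =>
      PySem.Chars.isIn [' ']
        (PySem.Chars.slice l (some (PySem.List.pyGetD qs i 0 + 1))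
          (some (PySem.List.pyGetD qs (i + 1) 0)))

def Bf (l : List Char) : Bool :=
  let st := l.foldl rule14Step (0, false, false, false)
  st.2.2.2 && (PySem.Int.mod st.1 2 == 0)

theorem rule_14_eq_Af (s : String) : rule_14 s = Af s.toList := rfl
theorem rule_14_alt_eq_Bf (s : String) : rule_14_alt s = Bf s.toList := rfl

-- quote-free, not in quote: state unchanged
theorem foldB_nq (a : List Char) (h : '"' ∉ a) (q : Int) (sp f : Bool) :
    a.foldl rule14Step (q, false, sp, f) = (q, false, sp, f) := by
  induction a with
  | nil => rfl
  | cons x t ih =>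
    have hx : x ≠ '"' := fun hh => h (hh ▸ List.mem_cons_self)
    have ht : '"' ∉ t := fun hh => h (List.mem_cons_of_mem _ hh)
    simp [List.foldl_cons, rule14Step, hx, ht, ih]

-- quote-free, in quote: seen accumulates spaces, count and found unchanged
theorem foldB_seg (c : List Char) (h : '"' ∉ c) (q : Int) (sp f : Bool) :
    c.foldl rule14Step (q, true, sp, f) = (q, true, sp || c.any (· == ' '), f) := by
  induction c generalizing sp with
  | nil => simp
  | cons x t ih =>
    have hx : x ≠ '"' := fun hh => h (hh ▸ List.mem_cons_self)
    have ht : '"' ∉ t := fun hh => h (List.mem_cons_of_mem _ hh)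
    by_cases hs : x = ' '
    · subst hs
      simp [List.foldl_cons, rule14Step, ih ht]
    · have hxs : (x == ' ') = false := by simpa using hs
      simp [List.foldl_cons, rule14Step, hx, hxs, ih ht]

-- count component is start + number of '"'
theorem foldB_count (d : List Char) : ∀ (st : Int × Bool × Bool × Bool),
    (d.foldl rule14Step st).1 = st.1 + d.count '"' := by
  induction d with
  | nil => intro st; simp
  | cons x t ih =>
    intro st
    by_cases hx : x = '"'
    · subst hx
      simp [List.foldl_cons, rule14Step, ih]
      ring
    · have hx' : (x == '"') = false := by simpa using hx
      by_cases hs : (x == ' ' && st.2.1) = true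
      · simp [List.foldl_cons, rule14Step, hx', hs, ih, hx]
      · simp [List.foldl_cons, rule14Step, hx', hs, ih, hx]

-- generalized shift: identical in_quote/seen on both runs
theorem foldB_gen (d : List Char) : ∀ (q q' : Int) (i sp f g : Bool),
    d.foldl rule14Step (q, i, sp, f || g) =
      ((d.foldl rule14Step (q', i, sp, g)).1 + (q - q'),
       (d.foldl rule14Step (q', i, sp, g)).2.1,
       (d.foldl rule14Step (q', i, sp, g)).2.2.1,
       f || (d.foldl rule14Step (q', i, sp, g)).2.2.2) := by
  induction d with
  | nil => intro q q' i sp f g; simp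
  | cons x t ih =>
    intro q q' i sp f g
    by_cases hx : x = '"'
    · subst hx
      have hfg : (if i && sp then true else f || g) = (f || (if i && sp then true else g)) := by
        cases i <;> cases sp <;> cases f <;> cases g <;> rfl
      simp only [List.foldl_cons, rule14Step, BEq.rfl, if_true, hfg]
      have := ih (q+1) (q'+1) (!i) (if i then sp else false) f (if i && sp then true else g)
      rw [this]; ring_nf
    · have hx' : (x == '"') = false := by simpa using hx
      by_cases hs : (x == ' ' && i) = true
      · simp only [List.foldl_cons, rule14Step, hx', Bool.false_eq_true, if_false, hs, if_true]
        exact ih q q' i true f g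
      · simp only [List.foldl_cons, rule14Step, hx', Bool.false_eq_true, if_false, hs]
        exact ih q q' i sp f g

-- composition from a closed (not-in-quote) state: count shifts, found ORs
theorem foldB_start (d : List Char) : ∀ (q : Int) (sp f : Bool),
    (d.foldl rule14Step (q, false, sp, f)).1
        = q + (d.foldl rule14Step (0, false, false, false)).1 ∧
    (d.foldl rule14Step (q, false, sp, f)).2.2.2
        = (f || (d.foldl rule14Step (0, false, false, false)).2.2.2) := by
  induction d with
  | nil => intro q sp f; simp
  | cons x t ih =>
    intro q sp f
    by_cases hx : x = '"'
    · subst hx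
      simp only [List.foldl_cons, rule14Step, BEq.rfl, if_true]
      have h1 := foldB_gen t (q + 1) (0 + 1) true false f false
      simp only [Bool.or_false] at h1
      norm_num at h1 ⊢
      rw [h1]
      constructor
      · ring
      · rfl
    · have hx' : (x == '"') = false := by simpa using hx
      simp only [List.foldl_cons, rule14Step, hx', Bool.false_eq_true, if_false, Bool.and_false]
      exact ih q sp f

theorem qIdx_cons (x : Char) (l : List Char) (st : Int) :
    qIdx (x :: l) st = if x == '"' then st :: qIdx l (st + 1) else qIdx l (st + 1) := by
  by_cases hx : x = '"' <;>
    simp [qIdx, PySem.List.enumerate_cons, hx]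

theorem qIdx_nq (a : List Char) (h : '"' ∉ a) : ∀ st, qIdx a st = [] := by
  induction a with
  | nil => intro st; rfl
  | cons x t ih =>
    intro st
    have hxx : x ≠ '"' := fun hh => h (by simp [hh])
    have hx : (x == '"') = false := by simpa using hxx
    rw [qIdx_cons, hx, if_neg (by simp)]
    exact ih (fun hh => h (List.mem_cons_of_mem _ hh)) (st + 1)

theorem qIdx_append_quote (a b : List Char) (h : '"' ∉ a) (st : Int) :
    qIdx (a ++ '"' :: b) st = (st + a.length) :: qIdx b (st + a.length + 1) := by
  induction a generalizing st with
  | nil => simp [qIdx_cons]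
  | cons x t ih =>
    have hxx : x ≠ '"' := fun hh => h (by simp [hh])
    have hx : (x == '"') = false := by simpa using hxx
    rw [List.cons_append, qIdx_cons, hx, if_neg (by simp),
        ih (fun hh => h (List.mem_cons_of_mem _ hh))]
    simp only [List.cons.injEq, List.length_cons]
    refine ⟨by push_cast; ring, ?_⟩
    congr 1
    push_cast; ring

theorem qIdx_length (l : List Char) : ∀ st, (qIdx l st).length = l.count '"' := by
  induction l with
  | nil => intro st; rfl
  | cons x t ih =>
    intro st
    rw [qIdx_cons]
    by_cases hx : x = '"' <;> simp [hx, ih]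

theorem qIdx_shift (l : List Char) : ∀ st, qIdx l st = (qIdx l 0).map (fun i => i + st) := by
  induction l with
  | nil => intro st; rfl
  | cons x t ih =>
    intro st
    have htail : List.map (fun i => i + (st + 1)) (qIdx t 0)
        = List.map (fun i => i + st) (List.map (fun i => i + (0 + 1)) (qIdx t 0)) := by
      rw [List.map_map]
      exact List.map_congr_left (fun i _ => by simp only [Function.comp_apply]; ring)
    rw [qIdx_cons, qIdx_cons, ih (st + 1), ih (0 + 1)]
    by_cases hx : x = '"'
    · simp only [hx, BEq.rfl, if_true, List.map_cons, List.cons.injEq]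
      exact ⟨by ring, htail⟩
    · have hx' : (x == '"') = false := by simpa using hx
      simp only [hx', Bool.false_eq_true, if_false]
      exact htail

theorem qIdx_nonneg (l : List Char) : ∀ st i, i ∈ qIdx l st → st ≤ i := by
  induction l with
  | nil => intro st i h; simp [qIdx] at h
  | cons x t ih =>
    intro st i h
    rw [qIdx_cons] at h
    by_cases hx : x = '"'
    · simp [hx] at h
      rcases h with h | h
      · omega
      · have := ih (st + 1) i h; omega
    · have hx' : (x == '"') = false := by simpa using hx
      rw [hx', if_neg (by simp)] at h
      have := ih (st + 1) i h; omega

theorem isIn_space_eq_any (c : List Char) : PySem.Chars.isIn [' '] c = c.any (· == ' ') := by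
  rw [Bool.eq_iff_iff, PySem.Chars.isIn_iff_infix, List.singleton_infix_iff, List.any_eq_true]
  constructor
  · intro h; exact ⟨' ', h, by simp⟩
  · rintro ⟨x, hx, he⟩; simpa using (by simpa using he : x = ' ') ▸ hx

theorem pairsAny_shift (qs : List Int) (h : ∀ i ∈ qs, 0 ≤ i) (pre d : List Char) :
    pairsAny (qs.map (fun i => i + pre.length)) (pre ++ d) = pairsAny qs d := by
  match qs with
  | [] => rfl
  | [i] => rfl
  | i :: j :: rest =>
    have hi : 0 ≤ i := h i (by simp)
    have hj : 0 ≤ j := h j (by simp)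
    have hrest : ∀ k ∈ rest, 0 ≤ k := fun k hk => h k (by simp [hk])
    simp only [List.map_cons, pairsAny]
    rw [pairsAny_shift rest hrest pre d]
    congr 1
    -- the shifted slice is the same segment of d
    obtain ⟨m, rfl⟩ := Int.eq_ofNat_of_zero_le hi
    obtain ⟨n, rfl⟩ := Int.eq_ofNat_of_zero_le hj
    have e1 : (m : Int) + pre.length + 1 = ((m + pre.length + 1 : Nat) : Int) := by push_cast; ring
    have e2 : (n : Int) + pre.length = ((n + pre.length : Nat) : Int) := by push_cast; ring
    have e3 : (m : Int) + 1 = ((m + 1 : Nat) : Int) := by push_cast; ring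
    rw [e1, e2, e3]
    simp only [PySem.Chars.slice_eq_listSlice, PySem.List.slice_natCast]
    have e4 : m + pre.length + 1 = pre.length + (m + 1) := by omega
    have e5 : (n + pre.length) - (pre.length + (m + 1)) = n - (m + 1) := by omega
    rw [e4, List.drop_length_add_append, e5]

theorem any_congr' {α : Type} (l : List α) (p q : α → Bool) (h : ∀ x ∈ l, p x = q x) :
    l.any p = l.any q := by
  induction l with
  | nil => rfl
  | cons a t ih => simp only [List.any_cons, h a (by simp), ih (fun x hx => h x (by simp [hx]))]

theorem pairs_eq (m : Nat) : ∀ (qs : List Int) (l : List Char), qs.length = 2 * m →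
    ((List.range m).any fun k =>
      PySem.Chars.isIn [' ']
        (PySem.Chars.slice l (some (PySem.List.pyGetD qs (0 + 2 * (k : Int)) 0 + 1))
          (some (PySem.List.pyGetD qs (0 + 2 * (k : Int) + 1) 0)))) = pairsAny qs l := by
  induction m with
  | zero =>
    intro qs l hlen
    have : qs = [] := List.eq_nil_of_length_eq_zero (by omega)
    subst this; rfl
  | succ m ih =>
    intro qs l hlen
    match qs, hlen with
    | i :: j :: rest, hlen =>
      have hrest : rest.length = 2 * m := by simp at hlen; omega
      rw [List.range_succ_eq_map]
      simp only [List.any_cons, List.any_map]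
      have hhead : (PySem.List.pyGetD (i :: j :: rest) (0 + 2 * ((0 : Nat) : Int)) 0 + 1) = i + 1 := by
        norm_num
      have hhead2 : PySem.List.pyGetD (i :: j :: rest) (0 + 2 * ((0 : Nat) : Int) + 1) 0 = j := by
        norm_num
        rw [show (1:Int) = ((1:Nat):Int) from rfl, PySem.List.pyGetD_natCast]
        rfl
      have htail : ∀ k : Nat,
          PySem.List.pyGetD (i :: j :: rest) (0 + 2 * ((k.succ : Nat) : Int)) 0
            = PySem.List.pyGetD rest (0 + 2 * (k : Int)) 0 ∧
          PySem.List.pyGetD (i :: j :: rest) (0 + 2 * ((k.succ : Nat) : Int) + 1) 0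
            = PySem.List.pyGetD rest (0 + 2 * (k : Int) + 1) 0 := by
        intro k
        have c1 : (0 + 2 * ((k.succ : Nat) : Int)) = ((2 * k + 2 : Nat) : Int) := by push_cast; ring
        have c2 : (0 + 2 * ((k.succ : Nat) : Int) + 1) = ((2 * k + 3 : Nat) : Int) := by push_cast; ring
        have c3 : (0 + 2 * ((k : Nat) : Int)) = ((2 * k : Nat) : Int) := by push_cast; ring
        have c4 : (0 + 2 * ((k : Nat) : Int) + 1) = ((2 * k + 1 : Nat) : Int) := by push_cast; ring
        rw [c2, c1, c4, c3, PySem.List.pyGetD_natCast, PySem.List.pyGetD_natCast,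
            PySem.List.pyGetD_natCast, PySem.List.pyGetD_natCast]
        constructor <;> rfl
      rw [hhead, hhead2]
      have : ((List.range m).any fun k =>
          PySem.Chars.isIn [' ']
            (PySem.Chars.slice l (some (PySem.List.pyGetD (i :: j :: rest) (0 + 2 * ((Nat.succ k : Nat) : Int)) 0 + 1))
              (some (PySem.List.pyGetD (i :: j :: rest) (0 + 2 * ((Nat.succ k : Nat) : Int) + 1) 0))))
          = ((List.range m).any fun k =>
          PySem.Chars.isIn [' ']
            (PySem.Chars.slice l (some (PySem.List.pyGetD rest (0 + 2 * ((k : Nat) : Int)) 0 + 1))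
              (some (PySem.List.pyGetD rest (0 + 2 * ((k : Nat) : Int) + 1) 0)))) := by
        apply any_congr'
        intro k _
        rw [(htail k).1, (htail k).2]
      rw [Function.comp_def] at *
      rw [this, ih rest l hrest]
      rfl


theorem first_quote_decomp (l : List Char) (h : '"' ∈ l) :
    ∃ a b, l = a ++ '"' :: b ∧ '"' ∉ a := by
  induction l with
  | nil => simp at h
  | cons x t ih =>
    by_cases hx : x = '"'
    · exact ⟨[], t, by simp [hx], by simp⟩
    · obtain ⟨a, b, he, ha⟩ := ih (List.mem_of_ne_of_mem (fun hh => hx hh.symm) h)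
      exact ⟨x :: a, b, by simp [he], by
        intro hm
        rcases List.mem_cons.1 hm with hm | hm
        · exact hx hm.symm
        · exact ha hm⟩

theorem Af_even (l : List Char) (m : Nat) (hm : (qIdx l 0).length = 2 * m) :
    Af l = pairsAny (qIdx l 0) l := by
  unfold Af
  rcases Nat.eq_zero_or_pos m with hm0 | hm0
  · subst hm0
    have : qIdx l 0 = [] := List.eq_nil_of_length_eq_zero (by omega)
    rw [this]
    simp [pairsAny]
  · rw [if_neg (by omega)]
    rw [hm]
    have hrange : PySem.List.pyRange 0 ((2 * m : Nat) : Int) 2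
        = List.map (fun k : Nat => (0 : Int) + 2 * (k : Int)) (List.range m) := by
      rw [PySem.List.pyRange_of_pos 0 ((2 * m : Nat) : Int) (by norm_num)]
      rw [if_pos (by push_cast; omega)]
      rw [show (((((2 * m : Nat) : Int) - 0 + 2 - 1) / 2).toNat) = m from by omega]
    rw [hrange, List.any_map]
    have hp := pairs_eq m (qIdx l 0) l hm
    rw [← hp]
    simp only [Function.comp_def]

theorem Af_odd (l : List Char) (h : (qIdx l 0).length % 2 = 1) : Af l = false := by
  unfold Af
  rw [if_pos (by omega)]

theorem Bf_closed (l : List Char) :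
    Bf l = ((l.foldl rule14Step (0, false, false, false)).2.2.2
        && ((l.count '"' % 2 : Nat) == 0)) := by
  have hc := foldB_count l (0, false, false, false)
  show ((l.foldl rule14Step (0, false, false, false)).2.2.2
      && (PySem.Int.mod (l.foldl rule14Step (0, false, false, false)).1 2 == 0)) = _
  congr 1
  rw [hc, show (0, false, false, false).1 + (l.count '"' : Int) = ((l.count '"' : Nat) : Int) from by push_cast; ring]
  rw [show ((2:Int)) = ((2:Nat):Int) from rfl, PySem.Int.mod_natCast]
  rw [Bool.eq_iff_iff, beq_iff_eq, beq_iff_eq]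
  omega

theorem main_eq (l : List Char) : Af l = Bf l := by
  by_cases h1 : '"' ∈ l
  · obtain ⟨a, b, rfl, ha⟩ := first_quote_decomp l h1
    by_cases h2 : '"' ∈ b
    · obtain ⟨c, d, rfl, hc⟩ := first_quote_decomp b h2
      have IH := main_eq d
      -- quote counts
      have hqa : List.count '"' a = 0 := List.count_eq_zero.2 ha
      have hqc : List.count '"' c = 0 := List.count_eq_zero.2 hc
      set nq := List.count '"' d with hnq
      -- the index list of the whole string
      have hq1 : qIdx (a ++ '"' :: (c ++ '"' :: d)) 0
          = (0 + (a.length : Int)) :: qIdx (c ++ '"' :: d) (0 + a.length + 1) :=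
        qIdx_append_quote a _ ha 0
      have hq2 : qIdx (c ++ '"' :: d) (0 + a.length + 1)
          = ((0 : Int) + a.length + 1 + c.length) :: qIdx d (0 + a.length + 1 + c.length + 1) :=
        qIdx_append_quote c d hc (0 + (a.length : Int) + 1)
      have hlen : (qIdx (a ++ '"' :: (c ++ '"' :: d)) 0).length = 2 + nq := by
        rw [hq1, hq2]
        simp [qIdx_length]
        omega
      -- count of the whole string
      have hcount : List.count '"' (a ++ '"' :: (c ++ '"' :: d)) = 2 + nq := by
        simp [List.count_append, hqa, hqc]
        omega
      -- B side state after the complete pair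
      have hfold : (a ++ '"' :: (c ++ '"' :: d)).foldl rule14Step (0, false, false, false)
          = d.foldl rule14Step (2, false, c.any (· == ' '), c.any (· == ' ')) := by
        rw [List.foldl_append, foldB_nq a ha, List.foldl_cons]
        have : rule14Step (0, false, false, false) '"' = (1, true, false, false) := rfl
        rw [this, List.foldl_append, foldB_seg c hc, List.foldl_cons]
        have hstep2 : rule14Step (1, true, false || c.any (· == ' '), false) '"'
            = (2, false, c.any (· == ' '), c.any (· == ' ')) := by
          simp [rule14Step]
          rw [Bool.eq_iff_iff]
          simp
        rw [hstep2]
      have hstart := foldB_start d 2 (c.any (· == ' ')) (c.any (· == ' '))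
      by_cases hpar : nq % 2 = 0
      · -- even total count
        obtain ⟨m, hm⟩ : ∃ m, nq = 2 * m := ⟨nq / 2, by omega⟩
        -- A side reduces to pairsAny
        rw [Af_even _ (m + 1) (by omega)]
        rw [hq1, hq2]
        simp only [pairsAny]
        -- first segment is c
        have hseg : PySem.Chars.slice (a ++ '"' :: (c ++ '"' :: d))
            (some (0 + (a.length : Int) + 1)) (some ((0 : Int) + a.length + 1 + c.length))
            = c := by
          have e1 : (0 : Int) + a.length + 1 = ((a.length + 1 : Nat) : Int) := by push_cast; ring
          have e2 : ((a.length + 1 : Nat) : Int) + c.length = ((a.length + 1 + c.length : Nat) : Int) := by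
            push_cast; ring
          rw [e1, e2]
          simp only [PySem.Chars.slice_eq_listSlice, PySem.List.slice_natCast]
          have e3 : a.length + 1 = (a ++ ['"']).length + 0 := by simp
          have e4 : a ++ '"' :: (c ++ '"' :: d) = (a ++ ['"']) ++ (c ++ '"' :: d) := by simp
          rw [e4, e3, List.drop_length_add_append]
          simp only [List.drop_zero]
          rw [show (a ++ ['"']).length + 0 + c.length - ((a ++ ['"']).length + 0) = c.length
            from by omega]
          exact List.take_left' rfl
        -- the rest of the pairs are d's pairs
        have hrest : pairsAny (qIdx d (0 + (a.length : Int) + 1 + c.length + 1))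
            (a ++ '"' :: (c ++ '"' :: d)) = pairsAny (qIdx d 0) d := by
          have hoff : qIdx d (0 + (a.length : Int) + 1 + c.length + 1)
              = (qIdx d 0).map (fun i => i + ((a ++ '"' :: c ++ ['"']).length : Int)) := by
            rw [qIdx_shift d (0 + (a.length : Int) + 1 + c.length + 1)]
            apply List.map_congr_left
            intro i _
            simp
            ring
          have hl : a ++ '"' :: (c ++ '"' :: d) = (a ++ '"' :: c ++ ['"']) ++ d := by simp
          rw [hoff, hl]
          exact pairsAny_shift (qIdx d 0) (fun i hi => qIdx_nonneg d 0 i hi) _ d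
        rw [hseg, hrest, isIn_space_eq_any]
        -- B side
        rw [Bf_closed, hfold, hstart.2, hcount]
        have : ((2 + nq) % 2 == 0) = true := by simp only [beq_iff_eq]; omega
        rw [this, Bool.and_true]
        -- d's pairs equal d's fold flag, via the induction hypothesis
        have hd : pairsAny (qIdx d 0) d = (d.foldl rule14Step (0, false, false, false)).2.2.2 := by
          have hAfd : Af d = pairsAny (qIdx d 0) d := by
            apply Af_even d m
            rw [qIdx_length]
            omega
          have hBfd : Bf d = (d.foldl rule14Step (0, false, false, false)).2.2.2 := by
            rw [Bf_closed]
            have : ((nq % 2 : Nat) == 0) = true := by simp only [beq_iff_eq]; omega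
            rw [← hnq, this, Bool.and_true]
          rw [← hAfd, IH, hBfd]
        rw [hd]
      · -- odd total count: both sides false
        rw [Af_odd _ (by omega)]
        rw [Bf_closed, hcount]
        have : ((2 + nq) % 2 == 0) = false := by simp only [beq_eq_false_iff_ne]; omega
        rw [this, Bool.and_false]
    · -- exactly one quote region: a single '"' and no further quote
      have hq : qIdx (a ++ '"' :: b) 0 = [(0 : Int) + a.length] := by
        rw [qIdx_append_quote a b ha 0, qIdx_nq b h2]
      rw [Af_odd _ (by rw [hq]; rfl)]
      unfold Bf
      rw [List.foldl_append, foldB_nq a ha, List.foldl_cons]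
      have : rule14Step (0, false, false, false) '"' = (1, true, false, false) := rfl
      rw [this, foldB_seg b h2]
      rfl
  · -- no quotes at all
    have hq : qIdx l 0 = [] := qIdx_nq l h1 0
    unfold Af Bf
    rw [hq, foldB_nq l h1]
    rfl
termination_by l.length
decreasing_by subst_vars; simp only [List.length_append, List.length_cons]; omega

-- ===== VERDICT (by name: the statement is the Claim_ definition above) =====
theorem rule_14_spec : Claim_equal_rule_14 := by
  intro s _
  unfold Spec_rule_14
  rw [rule_14_eq_Af, rule_14_alt_eq_Bf, main_eq]
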